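-- pv_equiv track=rewrite | github.com/nbso13/ems_for_rhythm_learning | scripts/ems_test.py | count_zero_gaps
-- ===== SOURCE A (Python) =====
-- def count_zero_gaps(rhyth_string):
--     zero_counter = 0
--     intervs = []
--     for i in range(len(rhyth_string)):
--         if rhyth_string[i] == '0':
--             zero_counter += 1 # add to interval
--         if rhyth_string[i] == '1':
--             intervs.append(zero_counter) # save interval
--             zero_counter = 0 # reset counter
--     if zero_counter > 0:
--         intervs.append(zero_counter)
--     else:
--         intervs.append(0) #ends with a 1
--     return intervs
-- ===== SOURCE B (Python) =====
-- def count_zero_gaps(rhyth_string):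
--     return [seg.count('0') for seg in rhyth_string.split('1')]
-- ===== Notes on version B (the rewrite author's own statement) =====
-- stated objective: simpler
-- what changed: Replaces the index loop with a running counter and per-character branches by split('1') into gap segments followed by mapping .count('0') over them.
import Mathlib
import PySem

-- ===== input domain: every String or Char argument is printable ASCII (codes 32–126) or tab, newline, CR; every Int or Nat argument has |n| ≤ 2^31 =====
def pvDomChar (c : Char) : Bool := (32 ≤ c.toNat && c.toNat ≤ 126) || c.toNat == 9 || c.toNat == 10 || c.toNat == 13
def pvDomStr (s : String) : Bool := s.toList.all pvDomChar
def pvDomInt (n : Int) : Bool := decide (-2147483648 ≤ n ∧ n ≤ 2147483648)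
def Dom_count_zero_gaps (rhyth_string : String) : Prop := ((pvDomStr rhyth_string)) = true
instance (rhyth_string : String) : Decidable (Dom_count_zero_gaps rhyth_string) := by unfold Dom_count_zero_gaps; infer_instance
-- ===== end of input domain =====

-- B replaces A's index loop with a running counter by split-on-'1' then a map of per-segment '0' counts (objective: simpler).

-- ===== PORT A =====
-- A's loop body: if s[i]=='0' bump the counter; if s[i]=='1' append it and reset.
def countZeroGapsStep (st : Int × List Int) (c : Char) : Int × List Int :=
  let st := if c == '0' then (st.1 + 1, st.2) else st
  if c == '1' then (0, st.2 ++ [st.1]) else st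

-- A's trailing 'if zero_counter > 0: append(zero_counter) else: append(0)'
def countZeroGapsFinish (st : Int × List Int) : List Int :=
  if st.1 > 0 then st.2 ++ [st.1] else st.2 ++ [0]

-- A walks i over range(len(s)); the index is always in range, so the defaulted get is exact here.
def count_zero_gaps (rhyth_string : String) : List Int :=
  countZeroGapsFinish
    ((PySem.List.pyRange 0 (PySem.List.len rhyth_string.toList) 1).foldl
      (fun st i => countZeroGapsStep st (PySem.List.pyGetD rhyth_string.toList i ' '))
      (0, []))

-- ===== PORT B =====
-- B: [seg.count('0') for seg in rhyth_string.split('1')]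
def count_zero_gaps_alt (rhyth_string : String) : List Int :=
  (PySem.Chars.splitOn rhyth_string.toList "1".toList).map
    (fun seg => (PySem.Chars.count seg "0".toList : Int))

-- ===== PRECONDITION & SPEC =====
def Spec_count_zero_gaps (rhyth_string : String) (out : List Int) : Prop := out = count_zero_gaps_alt rhyth_string
instance (rhyth_string : String) (out : List Int) : Decidable (Spec_count_zero_gaps rhyth_string out) := by unfold Spec_count_zero_gaps; infer_instance

-- ===== CLAIM (what is proved, stated in full; the proofs are below) =====
def Claim_equal_count_zero_gaps : Prop := ∀ (rhyth_string : String), Dom_count_zero_gaps rhyth_string → Spec_count_zero_gaps rhyth_string (count_zero_gaps rhyth_string)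

-- ===== LEMMAS AND PROOFS =====

-- canonical split of a char list at every '1'
def pvSplit1 : List Char → List (List Char)
  | [] => [[]]
  | c :: rest => if c = '1' then [] :: pvSplit1 rest else (pvSplit1 rest).modifyHead (c :: ·)

lemma pvSplit1_ne_nil (l : List Char) : pvSplit1 l ≠ [] := by
  cases l with
  | nil => simp [pvSplit1]
  | cons c rest =>
      simp only [pvSplit1]
      split_ifs
      · simp
      · cases h : pvSplit1 rest with
        | nil => exact absurd h (pvSplit1_ne_nil rest)
        | cons a as => simp [List.modifyHead]

-- splitOn.go with enough fuel and separator ['1'] is pvSplit1 with accumulators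
lemma splitOn_go_eq (l cur : List Char) (acc : List (List Char)) (fuel : Nat)
    (h : l.length < fuel) :
    PySem.Chars.splitOn.go ['1'] fuel l cur acc =
      acc.reverse ++ (pvSplit1 l).modifyHead (cur.reverse ++ ·) := by
  induction l generalizing cur acc fuel with
  | nil =>
      cases fuel with
      | zero => omega
      | succ f => simp [PySem.Chars.splitOn.go, pvSplit1]
  | cons c rest ih =>
      cases fuel with
      | zero => simp at h
      | succ f =>
        rw [PySem.Chars.splitOn.go]
        by_cases hc : c = '1'
        · subst hc
          have hp : List.isPrefixOf ['1'] ('1' :: rest) = true := by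
            simp [List.isPrefixOf]
          simp only [hp, if_pos, List.length_cons, List.length_nil, List.drop_succ_cons,
            List.drop_zero]
          rw [ih [] (cur.reverse :: acc) f (by simp at h; omega)]
          simp only [pvSplit1, if_pos, List.reverse_nil, List.nil_append, List.reverse_cons,
            List.append_assoc, List.singleton_append]
          cases pvSplit1 rest <;> simp [List.modifyHead]
        · have hp : List.isPrefixOf ['1'] (c :: rest) = false := by
            simp [List.isPrefixOf]
            exact fun hh => hc hh.symm
          simp only [hp]
          rw [if_neg (by simp)]
          rw [ih (c :: cur) acc f (by simp at h; omega)]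
          have hs : pvSplit1 (c :: rest) = (pvSplit1 rest).modifyHead (c :: ·) := by
            simp [pvSplit1, hc]
          rw [hs]
          cases hrest : pvSplit1 rest with
          | nil => exact absurd hrest (pvSplit1_ne_nil rest)
          | cons a as => simp [List.modifyHead]

lemma splitOn_eq_pvSplit1 (l : List Char) :
    PySem.Chars.splitOn l ['1'] = pvSplit1 l := by
  have := splitOn_go_eq l [] [] (l.length + 1) (by omega)
  simp only [PySem.Chars.splitOn] at *
  rw [this]
  cases h : pvSplit1 l with
  | nil => exact absurd h (pvSplit1_ne_nil l)
  | cons a as => simp [List.modifyHead]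

-- count.go with enough fuel and substring ['0'] counts the '0' characters
lemma count_go_eq (l : List Char) (acc fuel : Nat) (h : l.length ≤ fuel) :
    PySem.Chars.count.go ['0'] fuel l acc = acc + l.count '0' := by
  induction l generalizing acc fuel with
  | nil =>
      cases fuel with
      | zero => simp [PySem.Chars.count.go]
      | succ f => simp [PySem.Chars.count.go]
  | cons c rest ih =>
      cases fuel with
      | zero => simp at h
      | succ f =>
        rw [PySem.Chars.count.go]
        by_cases hc : c = '0'
        · subst hc
          have hp : List.isPrefixOf ['0'] ('0' :: rest) = true := by
            simp [List.isPrefixOf]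
          simp only [hp, if_pos, List.length_cons, List.length_nil, List.drop_succ_cons,
            List.drop_zero]
          rw [ih (acc + 1) f (by simp at h; omega)]
          have hcc : List.count '0' ('0' :: rest) = List.count '0' rest + 1 := by simp
          rw [hcc]; omega
        · have hp : List.isPrefixOf ['0'] (c :: rest) = false := by
            simp [List.isPrefixOf]
            exact fun hh => hc hh.symm
          simp only [hp]
          rw [if_neg (by simp)]
          rw [ih acc f (by simp at h; omega)]
          simp [hc]

lemma count_eq_count (seg : List Char) :
    PySem.Chars.count seg ['0'] = seg.count '0' := by
  simp only [PySem.Chars.count, List.isEmpty]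
  rw [count_go_eq seg 0 seg.length (le_refl _)]
  simp

-- the canonical result of A's loop + final append, starting with counter k
def pvGaps : List Char → Int → List Int
  | [], k => [k]
  | c :: rest, k =>
      if c = '1' then k :: pvGaps rest 0
      else if c = '0' then pvGaps rest (k + 1)
      else pvGaps rest k

-- A's fold followed by the final append equals intervs ++ pvGaps, given the counter is nonnegative
lemma foldA_eq (l : List Char) (k : Int) (intervs : List Int) (hk : 0 ≤ k) :
    countZeroGapsFinish (l.foldl countZeroGapsStep (k, intervs)) = intervs ++ pvGaps l k := by
  induction l generalizing k intervs with
  | nil =>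
      simp only [List.foldl_nil, pvGaps, countZeroGapsFinish]
      split_ifs with h
      · rfl
      · have : k = 0 := by omega
        simp [this]
  | cons c rest ih =>
      simp only [List.foldl_cons]
      by_cases h1 : c = '1'
      · subst h1
        have : countZeroGapsStep (k, intervs) '1' = (0, intervs ++ [k]) := by
          simp [countZeroGapsStep]
        rw [this, ih 0 (intervs ++ [k]) (le_refl 0)]
        simp [pvGaps]
      · by_cases h0 : c = '0'
        · subst h0
          have : countZeroGapsStep (k, intervs) '0' = (k + 1, intervs) := by
            simp [countZeroGapsStep]
          rw [this, ih (k + 1) intervs (by omega)]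
          simp [pvGaps]
        · have : countZeroGapsStep (k, intervs) c = (k, intervs) := by
            simp [countZeroGapsStep, h0, h1]
          rw [this, ih k intervs hk]
          simp [pvGaps, h0, h1]

-- pvGaps with starting counter k is the mapped zero counts with k added to the first
lemma pvGaps_eq_map (l : List Char) (k : Int) :
    pvGaps l k =
      ((pvSplit1 l).map (fun seg => ((seg.count '0' : Nat) : Int))).modifyHead (k + ·) := by
  induction l generalizing k with
  | nil => simp [pvGaps, pvSplit1, List.modifyHead]
  | cons c rest ih =>
      by_cases h1 : c = '1'
      · subst h1
        have hs : pvSplit1 ('1' :: rest) = [] :: pvSplit1 rest := by simp [pvSplit1]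
        have hg : pvGaps ('1' :: rest) k = k :: pvGaps rest 0 := by simp [pvGaps]
        rw [hg, hs, ih 0, List.map_cons]
        cases h : (pvSplit1 rest).map (fun seg => ((seg.count '0' : Nat) : Int)) with
        | nil =>
            have := pvSplit1_ne_nil rest
            simp at h
            exact absurd h this
        | cons a as => simp [List.modifyHead]
      · by_cases h0 : c = '0'
        · subst h0
          have hs : pvSplit1 ('0' :: rest) = (pvSplit1 rest).modifyHead ('0' :: ·) := by
            simp [pvSplit1]
          have hg : pvGaps ('0' :: rest) k = pvGaps rest (k + 1) := by simp [pvGaps]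
          rw [hg, hs, ih (k + 1)]
          cases h : pvSplit1 rest with
          | nil => exact absurd h (pvSplit1_ne_nil rest)
          | cons a as =>
              simp [List.modifyHead]
              omega
        · have hs : pvSplit1 (c :: rest) = (pvSplit1 rest).modifyHead (c :: ·) := by
            simp [pvSplit1, h1]
          have hg : pvGaps (c :: rest) k = pvGaps rest k := by simp [pvGaps, h0, h1]
          rw [hg, hs, ih k]
          cases h : pvSplit1 rest with
          | nil => exact absurd h (pvSplit1_ne_nil rest)
          | cons a as => simp [List.modifyHead, h0]

-- ===== VERDICT (by name: the statement is the Claim_ definition above) =====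
theorem count_zero_gaps_spec : Claim_equal_count_zero_gaps := by
  intro s _
  unfold Spec_count_zero_gaps count_zero_gaps count_zero_gaps_alt
  rw [PySem.List.foldl_pyRange_zero_pyGetD s.toList ' ' countZeroGapsStep (0, [])]
  rw [foldA_eq s.toList 0 [] (le_refl 0)]
  have h1 : ("1".toList : List Char) = ['1'] := rfl
  have h0 : ("0".toList : List Char) = ['0'] := rfl
  rw [h1, h0, splitOn_eq_pvSplit1, List.nil_append, pvGaps_eq_map s.toList 0]
  have hz : ∀ xs : List Int, xs.modifyHead (0 + ·) = xs := by
    intro xs; cases xs <;> simp [List.modifyHead]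
  rw [hz]
  simp [count_eq_count]
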